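-- pv_equiv track=rewrite | github.com/shahashka/SP-GIES | rank_interventions.py | gene_from_kmer
-- ===== SOURCE A (Python) =====
-- def gene_from_kmer(top_kmers, function_mapping, non_function_mapping, mapping_kmer):
--     # For each row in the gene matrix create determine if the gene is on or off based on the kmer there
--     top_genes = set()
--     for kmer in top_kmers:
--         for mapping in (function_mapping, non_function_mapping):
--             for gene, kmer_set in mapping.items():
--                 if kmer in kmer_set:
--                     top_genes.add(gene)
--     return top_genes
-- ===== SOURCE B (Python) =====
-- def gene_from_kmer(top_kmers, function_mapping, non_function_mapping, mapping_kmer):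
--     # Invert both mappings into a kmer -> genes index once, then look up each top kmer.
--     index = {}
--     for gene, kmer_set in list(function_mapping.items()) + list(non_function_mapping.items()):
--         for kmer in kmer_set:
--             index.setdefault(kmer, []).append(gene)
--     top_genes = set()
--     for kmer in top_kmers:
--         for gene in index.get(kmer, ()):
--             top_genes.add(gene)
--     return top_genes
-- ===== Notes on version B (the rewrite author's own statement) =====
-- stated objective: faster
-- what changed: B precomputes a kmer->genes inverted index over both mappings once and then just looks up each top kmer, replacing A's full scan of both mappings for every top kmer.
import Mathlib
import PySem

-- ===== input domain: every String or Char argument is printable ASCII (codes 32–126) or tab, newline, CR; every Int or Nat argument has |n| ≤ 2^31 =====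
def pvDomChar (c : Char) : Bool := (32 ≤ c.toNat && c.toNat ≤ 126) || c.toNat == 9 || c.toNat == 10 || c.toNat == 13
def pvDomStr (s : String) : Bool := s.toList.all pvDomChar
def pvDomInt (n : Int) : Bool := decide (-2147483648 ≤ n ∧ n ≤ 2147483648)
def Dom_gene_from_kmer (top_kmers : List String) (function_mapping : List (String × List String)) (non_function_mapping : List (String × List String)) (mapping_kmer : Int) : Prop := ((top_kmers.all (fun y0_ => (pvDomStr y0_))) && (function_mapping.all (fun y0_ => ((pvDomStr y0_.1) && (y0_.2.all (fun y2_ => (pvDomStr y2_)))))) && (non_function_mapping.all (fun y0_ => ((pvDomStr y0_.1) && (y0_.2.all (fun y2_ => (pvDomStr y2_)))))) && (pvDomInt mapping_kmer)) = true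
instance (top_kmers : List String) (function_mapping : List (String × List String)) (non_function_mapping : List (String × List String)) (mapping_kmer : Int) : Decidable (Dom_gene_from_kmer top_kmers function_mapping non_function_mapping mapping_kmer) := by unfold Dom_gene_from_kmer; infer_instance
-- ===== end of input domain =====

-- ===== PORT A =====
-- A: for each top kmer, scan both mappings and collect genes whose kmer-set contains it.
def gene_from_kmer (top_kmers : List String) (function_mapping : List (String × List String)) (non_function_mapping : List (String × List String)) (mapping_kmer : Int) : List String :=
  top_kmers.foldl (fun top_genes kmer =>
    [function_mapping, non_function_mapping].foldl (fun top_genes mapping =>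
      mapping.foldl (fun top_genes p =>
        if kmer ∈ p.2 then PySem.Set.add top_genes p.1 else top_genes) top_genes) top_genes)
    PySem.Set.empty

-- ===== PORT B =====
-- B: build a kmer -> genes index once, then look up each top kmer. (objective: faster, asymptotic)
def gene_from_kmer_alt (top_kmers : List String) (function_mapping : List (String × List String)) (non_function_mapping : List (String × List String)) (mapping_kmer : Int) : List String :=
  let index : PySem.Dict String (List String) :=
    (function_mapping ++ non_function_mapping).foldl (fun index p =>
      p.2.foldl (fun index kmer => index.modify kmer [] (fun gs => gs ++ [p.1])) index)
      PySem.Dict.empty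
  top_kmers.foldl (fun top_genes kmer =>
    (index.getD kmer []).foldl (fun top_genes gene => PySem.Set.add top_genes gene) top_genes)
    PySem.Set.empty

-- ===== PRECONDITION & SPEC =====
def Spec_gene_from_kmer (top_kmers : List String) (function_mapping : List (String × List String)) (non_function_mapping : List (String × List String)) (mapping_kmer : Int) (out : List String) : Prop := out = gene_from_kmer_alt top_kmers function_mapping non_function_mapping mapping_kmer
instance (top_kmers : List String) (function_mapping : List (String × List String)) (non_function_mapping : List (String × List String)) (mapping_kmer : Int) (out : List String) : Decidable (Spec_gene_from_kmer top_kmers function_mapping non_function_mapping mapping_kmer out) := by unfold Spec_gene_from_kmer; infer_instance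

-- ===== CLAIM (what is proved, stated in full; the proofs are below) =====
def Claim_equal_gene_from_kmer : Prop := ∀ (top_kmers : List String) (function_mapping : List (String × List String)) (non_function_mapping : List (String × List String)) (mapping_kmer : Int), Dom_gene_from_kmer top_kmers function_mapping non_function_mapping mapping_kmer → Spec_gene_from_kmer top_kmers function_mapping non_function_mapping mapping_kmer (gene_from_kmer top_kmers function_mapping non_function_mapping mapping_kmer)

-- ===== LEMMAS AND PROOFS =====

-- index content after processing one kmer-set of one gene
theorem getD_foldl_modify_append (ks : List String) (g k : String)
    (idx : PySem.Dict String (List String)) :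
    (ks.foldl (fun idx kmer => idx.modify kmer [] (fun gs => gs ++ [g])) idx).getD k []
      = idx.getD k [] ++ List.replicate (ks.count k) g := by
  induction ks generalizing idx with
  | nil => simp
  | cons km rest ih =>
    simp only [List.foldl_cons, ih, PySem.Dict.getD_modify, List.count_cons]
    by_cases h : k = km
    · subst h
      simp [List.replicate_succ]
    · simp [h, Ne.symm h]

-- index content after processing a whole mapping
theorem getD_build_mapping (m : List (String × List String)) (k : String)
    (idx : PySem.Dict String (List String)) :
    ((m.foldl (fun idx p =>
        p.2.foldl (fun idx kmer => idx.modify kmer [] (fun gs => gs ++ [p.1])) idx) idx).getD k [])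
      = idx.getD k [] ++ m.flatMap (fun p => List.replicate (p.2.count k) p.1) := by
  induction m generalizing idx with
  | nil => simp
  | cons p rest ih =>
    simp only [List.foldl_cons, ih, List.flatMap_cons, getD_foldl_modify_append,
      List.append_assoc]

-- adding n copies of the same element to a set = adding it once (if n > 0)
theorem foldl_add_replicate {α : Type} [BEq α] [LawfulBEq α] (n : Nat) (s : PySem.Set α) (g : α) :
    (List.replicate n g).foldl (fun s x => PySem.Set.add s x) s
      = if n = 0 then s else PySem.Set.add s g := by
  induction n generalizing s with
  | zero => simp
  | succ m ih =>
    simp only [List.replicate_succ, List.foldl_cons, ih]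
    by_cases hm : m = 0
    · simp [hm]
    · simp [hm, PySem.Set.add_of_mem ((PySem.Set.mem_add _ _ _).mpr (Or.inr rfl))]

-- folding Set.add over one mapping's index entries = A's conditional scan of that mapping
theorem foldl_add_flatMap (m : List (String × List String)) (k : String) (s : PySem.Set String) :
    (m.flatMap (fun p => List.replicate (p.2.count k) p.1)).foldl
        (fun s x => PySem.Set.add s x) s
      = m.foldl (fun s p => if k ∈ p.2 then PySem.Set.add s p.1 else s) s := by
  induction m generalizing s with
  | nil => rfl
  | cons p rest ih =>
    simp only [List.flatMap_cons, List.foldl_append, List.foldl_cons,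
      foldl_add_replicate, ih]
    by_cases h : k ∈ p.2
    · have hc : p.2.count k ≠ 0 := Nat.pos_iff_ne_zero.mp (List.count_pos_iff.mpr h)
      simp [h, hc]
    · simp [h, List.count_eq_zero_of_not_mem h]

-- ===== VERDICT (by name: the statement is the Claim_ definition above) =====
theorem gene_from_kmer_spec : Claim_equal_gene_from_kmer := by
  intro top_kmers fm nfm mk _
  unfold Spec_gene_from_kmer gene_from_kmer gene_from_kmer_alt
  show top_kmers.foldl _ PySem.Set.empty = top_kmers.foldl _ PySem.Set.empty
  have hstep : (fun (s : PySem.Set String) (kmer : String) =>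
      [fm, nfm].foldl (fun s mapping =>
        mapping.foldl (fun s p => if kmer ∈ p.2 then PySem.Set.add s p.1 else s) s) s)
    = (fun (s : PySem.Set String) (kmer : String) =>
      ((((fm ++ nfm).foldl (fun idx p =>
            p.2.foldl (fun idx km => idx.modify km [] (fun gs => gs ++ [p.1])) idx)
          PySem.Dict.empty).getD kmer []).foldl (fun s g => PySem.Set.add s g) s)) := by
    funext s kmer
    simp only [List.foldl_cons, List.foldl_nil, getD_build_mapping,
      PySem.Dict.getD_empty, List.nil_append, List.foldl_append, foldl_add_flatMap]
  rw [hstep]
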